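-- pv_equiv track=rewrite | github.com/EWARS2/UNW-Old | StringProcessing/Oppish.py | oppish
-- ===== SOURCE A (Python) =====
-- def oppish(s):
--     # 'Y' is considered to be a vowel
--     consonants = 'bcdfghjklmnpqrstvwxz'
--     word_ends = ' ,.-_~/\\\n\"\''
--     return_string = ''
--     s_len = len(s)
--     for i in range(s_len):
--         i_char = s[i]
--         return_string += i_char
--         if i + 1 < s_len:
--             i_char2 = s[i + 1]
--             if i_char in consonants and i_char2 not in consonants and i_char2 not in word_ends:
--                 return_string += 'opp'
--     return return_string
-- ===== SOURCE B (Python) =====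
-- def oppish(s):
--     # 'Y' is considered to be a vowel
--     consonants = 'bcdfghjklmnpqrstvwxz'
--     word_ends = ' ,.-_~/\\\n\"\''
--     # Stage 1: compute the cut positions (after a consonant followed by a vowel-ish char).
--     # Stage 2: slice the string at those positions and join the pieces with 'opp'.
--     cuts = [0]
--     for i in range(len(s) - 1):
--         if s[i] in consonants and s[i + 1] not in consonants and s[i + 1] not in word_ends:
--             cuts.append(i + 1)
--     cuts.append(len(s))
--     return 'opp'.join(s[a:b] for a, b in zip(cuts, cuts[1:]))
-- ===== Notes on version B (the rewrite author's own statement) =====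
-- stated objective: alternative
-- what changed: Instead of A's single accumulating pass that appends each character plus an optional suffix to a growing string, B works in two stages: it first computes the list of cut positions (after each consonant-then-vowel boundary), then slices the string at consecutive cuts and joins the pieces with the suffix as separator.
import Mathlib
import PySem

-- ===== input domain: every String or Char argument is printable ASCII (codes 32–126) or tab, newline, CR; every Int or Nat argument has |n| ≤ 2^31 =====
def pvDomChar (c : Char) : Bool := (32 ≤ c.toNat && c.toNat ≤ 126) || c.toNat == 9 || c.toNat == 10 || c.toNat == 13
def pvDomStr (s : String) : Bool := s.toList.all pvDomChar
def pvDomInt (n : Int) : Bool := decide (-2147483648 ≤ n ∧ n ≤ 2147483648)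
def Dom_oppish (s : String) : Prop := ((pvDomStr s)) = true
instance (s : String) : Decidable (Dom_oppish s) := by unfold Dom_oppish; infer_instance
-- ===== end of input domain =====

-- B replaces A's single accumulating pass (append each char, maybe 'opp') by two stages: first compute
-- the list of cut positions, then slice the string at the cuts and join the pieces with 'opp' (objective: alternative).

-- ===== PORT A =====
-- Python's `c in consonants` on a single char is char membership in the list of chars (exact here: c is one char).
def oppishCons : List Char := "bcdfghjklmnpqrstvwxz".toList
def oppishEnds : List Char := " ,.-_~/\\\n\"'".toList

-- Literal port of A: loop over range(len(s)), building the result string (modelled as List Char,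
-- since Lean's String.append is kernel-opaque); `s[i]` is PySem.List.pyGet? (always in range here).
def oppish (s : String) : String :=
  let cs := s.toList
  let n : Int := (cs.length : Int)
  let r := (PySem.List.pyRange 0 n 1).foldl (fun acc i =>
    match PySem.List.pyGet? cs i with
    | none => acc   -- unreachable: 0 ≤ i < n
    | some c =>
      let acc2 := acc ++ [c]
      if i + 1 < n then
        match PySem.List.pyGet? cs (i + 1) with
        | none => acc2
        | some c2 =>
          if c ∈ oppishCons ∧ c2 ∉ oppishCons ∧ c2 ∉ oppishEnds
          then acc2 ++ ['o', 'p', 'p'] else acc2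
      else acc2) []
  String.ofList r

-- ===== PORT B =====
-- the loop-body test `s[i] in consonants and s[i+1] not in consonants and s[i+1] not in word_ends`
-- (both indices in range for i in range(len(s)-1); pyGet? is s[_])
def oppishQ (cs : List Char) (i : Int) : Bool :=
  match PySem.List.pyGet? cs i, PySem.List.pyGet? cs (i + 1) with
  | some c, some c2 => decide (c ∈ oppishCons ∧ c2 ∉ oppishCons ∧ c2 ∉ oppishEnds)
  | _, _ => false

-- Literal port of B: stage 1 builds the cut list [0] ++ appended mids ++ [len(s)] by the range loop;
-- stage 2 slices s at consecutive cuts (s[a:b] = PySem.List.slice) and joins with 'opp' (PySem.Chars.join).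
def oppish_alt (s : String) : String :=
  let cs := s.toList
  let n : Int := (cs.length : Int)
  let cuts : List Int :=
    ((PySem.List.pyRange 0 (n - 1) 1).foldl
      (fun acc i => if oppishQ cs i then acc ++ [i + 1] else acc) [0]) ++ [n]
  String.ofList (PySem.Chars.join ['o', 'p', 'p']
    ((cuts.zip (cuts.drop 1)).map (fun p => PySem.List.slice cs (some p.1) (some p.2))))

-- ===== PRECONDITION & SPEC =====
def Spec_oppish (s : String) (out : String) : Prop := out = oppish_alt s
instance (s : String) (out : String) : Decidable (Spec_oppish s out) := by unfold Spec_oppish; infer_instance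

-- ===== CLAIM (what is proved, stated in full; the proofs are below) =====
def Claim_equal_oppish : Prop := ∀ (s : String), Dom_oppish s → Spec_oppish s (oppish s)

-- ===== LEMMAS AND PROOFS =====

-- the common form both ports are reduced to: per adjacent pair, the char plus maybe 'opp', plus the last char
def oppishZ (cs : List Char) : List Char :=
  ((cs.zip (cs.drop 1)).map (fun p =>
      if p.1 ∈ oppishCons ∧ p.2 ∉ oppishCons ∧ p.2 ∉ oppishEnds
      then p.1 :: ['o', 'p', 'p'] else [p.1])).flatten
    ++ cs.drop (cs.length - 1)

-- ---- A-side: A's fold = oppishZ ----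

-- per-index contribution of A's loop, in Nat-index form
def oppishStep (cs : List Char) (i : Nat) : List Char :=
  match cs[i]? with
  | none => []
  | some c =>
    c :: (if i + 1 < cs.length then
            match cs[i + 1]? with
            | none => []
            | some c2 =>
              if c ∈ oppishCons ∧ c2 ∉ oppishCons ∧ c2 ∉ oppishEnds
              then ['o', 'p', 'p'] else []
          else [])

lemma oppishStep_succ (c : Char) (rest : List Char) (i : Nat) :
    oppishStep (c :: rest) (i + 1) = oppishStep rest i := by
  simp [oppishStep]

lemma oppish_flat (cs : List Char) :
    (List.range cs.length).flatMap (oppishStep cs) = oppishZ cs := by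
  induction cs with
  | nil => simp [oppishZ]
  | cons c rest ih =>
    have hshift : (List.range rest.length).flatMap (fun i => oppishStep (c :: rest) (i + 1))
        = (List.range rest.length).flatMap (oppishStep rest) := by
      apply List.flatMap_congr
      intro i _
      exact oppishStep_succ c rest i
    cases rest with
    | nil => simp [oppishStep, oppishZ]
    | cons c2 rest2 =>
      have : List.range (c2 :: rest2).length.succ
          = 0 :: (List.range (c2 :: rest2).length).map (· + 1) := by
        simpa using (List.range_succ_eq_map (n := (c2 :: rest2).length))
      simp only [List.length_cons] at *
      rw [this]
      simp only [List.flatMap_cons, List.flatMap_map]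
      rw [hshift, ih]
      simp [oppishStep, oppishZ]
      by_cases h : c ∈ oppishCons ∧ c2 ∉ oppishCons ∧ c2 ∉ oppishEnds <;> simp [h]

lemma oppish_eq_Z (s : String) : oppish s = String.ofList (oppishZ s.toList) := by
  unfold oppish
  set cs := s.toList with hcs
  simp only []
  congr 1
  have hf : (fun (acc : List Char) (i : Int) =>
      match PySem.List.pyGet? cs i with
      | none => acc
      | some c =>
        let acc2 := acc ++ [c]
        if i + 1 < (cs.length : Int) then
          match PySem.List.pyGet? cs (i + 1) with
          | none => acc2
          | some c2 =>
            if c ∈ oppishCons ∧ c2 ∉ oppishCons ∧ c2 ∉ oppishEnds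
            then acc2 ++ ['o', 'p', 'p'] else acc2
        else acc2)
      = (fun acc i => acc ++
          (match PySem.List.pyGet? cs i with
           | none => []
           | some c =>
             c :: (if i + 1 < (cs.length : Int) then
                     match PySem.List.pyGet? cs (i + 1) with
                     | none => []
                     | some c2 =>
                       if c ∈ oppishCons ∧ c2 ∉ oppishCons ∧ c2 ∉ oppishEnds
                       then ['o', 'p', 'p'] else []
                   else [])) ) := by
    funext acc i
    rcases h1 : PySem.List.pyGet? cs i with _ | c
    · simp
    · simp only []
      by_cases h2 : i + 1 < (cs.length : Int)
      · rcases h3 : PySem.List.pyGet? cs (i + 1) with _ | c2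
        · simp [h2]
        · simp only [h2, if_pos]
          by_cases h4 : c ∈ oppishCons ∧ c2 ∉ oppishCons ∧ c2 ∉ oppishEnds <;>
            simp [h4]
      · simp [h2]
  rw [hf, PySem.List.foldl_append_eq_flatMap, List.nil_append,
      PySem.List.pyRange_zero_natCast, List.flatMap_map]
  rw [← oppish_flat cs]
  apply List.flatMap_congr
  intro i _
  have hc : ((i : Int) + 1) = ((i + 1 : Nat) : Int) := by push_cast; ring
  rw [PySem.List.pyGet?_natCast, hc, PySem.List.pyGet?_natCast]
  have hlt : ((i : Int) + 1 < (cs.length : Int)) ↔ i + 1 < cs.length := by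
    exact_mod_cast Iff.rfl
  simp [oppishStep, hlt]

-- ---- B-side: cuts-and-join = oppishZ ----

-- Nat-index form of the loop test
def oppishQN (cs : List Char) (i : Nat) : Bool :=
  match cs[i]?, cs[i + 1]? with
  | some c, some c2 => decide (c ∈ oppishCons ∧ c2 ∉ oppishCons ∧ c2 ∉ oppishEnds)
  | _, _ => false

-- the mid cut positions, Nat form
def oppishMids (cs : List Char) : List Nat :=
  ((List.range (cs.length - 1)).filter (oppishQN cs)).map (· + 1)

-- the pieces of cs from position a, cut at the mids, joined with 'opp'
def oppishSeg (cs : List Char) (a : Nat) : List Nat → List Char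
  | [] => (cs.drop a).take (cs.length - a)
  | m :: ms => (cs.drop a).take (m - a) ++ ['o', 'p', 'p'] ++ oppishSeg cs m ms

lemma oppishSeg_shift (c : Char) (tl : List Char) (ms : List Nat) (a : Nat) :
    oppishSeg (c :: tl) (a + 1) (ms.map (· + 1)) = oppishSeg tl a ms := by
  induction ms generalizing a with
  | nil => simp [oppishSeg, Nat.succ_sub_succ]
  | cons m ms ih => simp [oppishSeg, Nat.succ_sub_succ, ih]

lemma oppishSeg_cons (c : Char) (tl : List Char) (ms : List Nat) :
    oppishSeg (c :: tl) 0 (ms.map (· + 1)) = c :: oppishSeg tl 0 ms := by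
  cases ms with
  | nil => simp [oppishSeg]
  | cons m ms => simp [oppishSeg, oppishSeg_shift]

lemma oppishQN_succ (c : Char) (tl : List Char) (i : Nat) :
    oppishQN (c :: tl) (i + 1) = oppishQN tl i := by
  simp [oppishQN]

lemma oppishMids_cons (c c2 : Char) (tl : List Char) :
    oppishMids (c :: c2 :: tl)
      = (if oppishQN (c :: c2 :: tl) 0 then [1] else [])
        ++ (oppishMids (c2 :: tl)).map (· + 1) := by
  unfold oppishMids
  have hr : List.range ((c :: c2 :: tl).length - 1)
      = 0 :: (List.range ((c2 :: tl).length - 1)).map (· + 1) := by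
    simpa using (List.range_succ_eq_map (n := (c2 :: tl).length - 1))
  have hfm : (List.filter (oppishQN (c :: c2 :: tl))
        ((List.range ((c2 :: tl).length - 1)).map (· + 1)))
      = ((List.range ((c2 :: tl).length - 1)).filter (oppishQN (c2 :: tl))).map (· + 1) := by
    rw [List.filter_map]
    simp only [Function.comp_def, oppishQN_succ]
  rw [hr, List.filter_cons, hfm]
  cases h : oppishQN (c :: c2 :: tl) 0 <;>
    simp [List.map_map, Function.comp_def]

lemma oppishSeg_eq_Z (cs : List Char) : oppishSeg cs 0 (oppishMids cs) = oppishZ cs := by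
  induction cs with
  | nil => simp [oppishMids, oppishSeg, oppishZ]
  | cons c tl ih =>
    cases tl with
    | nil => simp [oppishMids, oppishSeg, oppishZ]
    | cons c2 tl2 =>
      rw [oppishMids_cons]
      have hZ : oppishZ (c :: c2 :: tl2)
          = (if c ∈ oppishCons ∧ c2 ∉ oppishCons ∧ c2 ∉ oppishEnds
             then c :: ['o', 'p', 'p'] else [c]) ++ oppishZ (c2 :: tl2) := by
        by_cases h : c ∈ oppishCons ∧ c2 ∉ oppishCons ∧ c2 ∉ oppishEnds <;>
          simp [oppishZ, h]
      have hq : oppishQN (c :: c2 :: tl2) 0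
          = decide (c ∈ oppishCons ∧ c2 ∉ oppishCons ∧ c2 ∉ oppishEnds) := by
        simp [oppishQN]
      rw [hq]
      by_cases h : c ∈ oppishCons ∧ c2 ∉ oppishCons ∧ c2 ∉ oppishEnds
      · rw [if_pos (decide_eq_true h), hZ, if_pos h, List.singleton_append]
        have h1 : oppishSeg (c :: c2 :: tl2) 0 (1 :: (oppishMids (c2 :: tl2)).map (· + 1))
            = (c :: c2 :: tl2).take 1 ++ ['o', 'p', 'p']
              ++ oppishSeg (c :: c2 :: tl2) 1 ((oppishMids (c2 :: tl2)).map (· + 1)) := by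
          simp [oppishSeg]
        rw [h1]
        have h2 := oppishSeg_shift c (c2 :: tl2) (oppishMids (c2 :: tl2)) 0
        simp only [Nat.zero_add] at h2
        rw [h2, ih]
        simp
      · rw [if_neg (by simp [h]), hZ, if_neg h, List.nil_append]
        rw [oppishSeg_cons, ih]
        simp

-- the join over consecutive cut pairs is oppishSeg (induction over the mids, generalizing the start cut)
lemma oppish_join_cuts (cs : List Char) (ms : List Nat) (a : Nat) :
    PySem.Chars.join ['o', 'p', 'p']
      ((((a :: ms ++ [cs.length]).zip (ms ++ [cs.length])).map
          (fun p => (cs.drop p.1).take (p.2 - p.1))))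
      = oppishSeg cs a ms := by
  induction ms generalizing a with
  | nil => simp [oppishSeg, PySem.Chars.join_singleton]
  | cons m ms ih =>
    have hzip : ((a :: (m :: ms) ++ [cs.length]).zip ((m :: ms) ++ [cs.length]))
        = (a, m) :: ((m :: ms ++ [cs.length]).zip (ms ++ [cs.length])) := by
      simp
    rw [hzip, List.map_cons]
    have htail : ((m :: ms ++ [cs.length]).zip (ms ++ [cs.length])).map
        (fun p => (cs.drop p.1).take (p.2 - p.1))
        = ((cs.drop m).take ((ms ++ [cs.length]).headI - m))
          :: (((ms ++ [cs.length]).zip (((ms ++ [cs.length]).drop 1))).map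
                (fun p => (cs.drop p.1).take (p.2 - p.1))) := by
      cases ms <;> simp
    rw [htail, PySem.Chars.join_cons_cons, ← htail]
    rw [ih m]
    simp [oppishSeg]

lemma oppish_alt_eq_Z (s : String) : oppish_alt s = String.ofList (oppishZ s.toList) := by
  unfold oppish_alt
  set cs := s.toList with hcs
  simp only []
  congr 1
  cases hn : cs with
  | nil => simp [PySem.List.pyRange, oppishZ, PySem.Chars.join_singleton, PySem.List.slice]
  | cons c0 tl =>
    have hlen : (1 : Nat) ≤ cs.length := by rw [hn]; simp
    have hn1 : ((cs.length : Int) - 1) = ((cs.length - 1 : Nat) : Int) := by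
      omega
    rw [← hn]
    rw [hn1, PySem.List.pyRange_zero_natCast, List.foldl_map,
        PySem.List.foldl_append_if (p := fun k : Nat => oppishQ cs (k : Int))
          (f := fun k : Nat => ((k : Int)) + 1)]
    -- the Int cut list is the cast of the Nat cut list
    have hq : ∀ k : Nat, oppishQ cs ((k : Nat) : Int) = oppishQN cs k := by
      intro k
      have hc : (((k : Nat) : Int) + 1) = ((k + 1 : Nat) : Int) := by push_cast; ring
      unfold oppishQ oppishQN
      rw [hc, PySem.List.pyGet?_natCast, PySem.List.pyGet?_natCast]
    have hfq : List.filter (fun k : Nat => oppishQ cs (↑k : Int)) (List.range (cs.length - 1))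
        = List.filter (oppishQN cs) (List.range (cs.length - 1)) :=
      List.filter_congr fun k _ => hq k
    rw [hfq]
    have hL : (([(0 : Int)] ++
          (List.filter (oppishQN cs) (List.range (cs.length - 1))).map
            (fun k : Nat => ((k : Nat) : Int) + 1)) ++ [((cs.length : Nat) : Int)])
        = (0 :: oppishMids cs ++ [cs.length]).map (fun k : Nat => ((k : Nat) : Int)) := by
      simp [oppishMids, List.map_map, Function.comp_def]
    rw [hL]
    have hzipmap : ∀ (l : List Nat),
        ((l.map (fun k : Nat => ((k : Nat) : Int))).zip
            ((l.map (fun k : Nat => ((k : Nat) : Int))).drop 1)).map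
            (fun p => PySem.List.slice cs (some p.1) (some p.2))
          = ((l.zip (l.drop 1)).map (fun p => (cs.drop p.1).take (p.2 - p.1))) := by
      intro l
      rw [← List.map_drop, List.zip_map, List.map_map]
      apply List.map_congr_left
      intro p _
      simp [PySem.List.slice_natCast]
    rw [hzipmap]
    have hjc := oppish_join_cuts cs (oppishMids cs) 0
    simp only [List.cons_append, List.drop_succ_cons, List.drop_zero] at hjc ⊢
    rw [hjc, oppishSeg_eq_Z]

-- ===== VERDICT (by name: the statement is the Claim_ definition above) =====
theorem oppish_spec : Claim_equal_oppish := by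
  intro s _
  show oppish s = oppish_alt s
  rw [oppish_eq_Z, oppish_alt_eq_Z]
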